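-- pv_equiv track=rewrite | github.com/JulesGohier/Cortex-Challenge | script/algo_calculation.py | algo_calculation
-- ===== SOURCE A (Python) =====
-- def subset_sum(numbers: list, target: int, partial=[], partial_sum=0) -> list:
--     """
--     Function which returns a list of numbers (from the list *numbers*) which added together give the targeted number
--     :param numbers: a list of 6 different numbers
--     :param target: number targeted (central number)
--     :param partial: a part of the original list *numbers*
--     :param partial_sum: a part of the original list *numbers*
--     :return: a list of number which added together give the target number
--     """
--     if partial_sum == target:
--         yield partial
--     if partial_sum >= target:
--         return
--     for i, n in enumerate(numbers):
--         remaining = numbers[i + 1:]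
--         yield from subset_sum(remaining, target, partial + [n], partial_sum + n)
--
-- def algo_calculation(numbers: list, target: int) -> str:
--     """
--     Function which returns all the different lists of numbers (from the list *numbers*)
--     which added together give the targeted number into a string
--     :param numbers: a list of 6 different numbers
--     :param target: number targeted (central number)
--     :return: string with all combinations possible equal to the targeted number
--     """
--     response: str = ""
--     for subset in subset_sum(numbers, target):
--         result: str = "\""
--         for i in subset:
--             x: str = str(i)
--             result = result + x + "+"
--         result = result[:-1] + "\""
--         response = response + result + " OU "
--     response = response[:-4]
--     return response
-- ===== SOURCE B (Python) =====
-- def algo_calculation(numbers: list, target: int) -> str: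
--     # Iterative version: explicit LIFO stack replaces the recursive generator;
--     # children pushed in reverse index order so pop order matches A's preorder.
--     parts = []
--     stack = [(numbers, [], 0)]
--     while stack:
--         rest, partial, s = stack.pop()
--         if s == target:
--             parts.append(('"' + "".join(str(n) + "+" for n in partial))[:-1] + '"')
--         if s >= target:
--             continue
--         for i in reversed(range(len(rest))):
--             stack.append((rest[i + 1:], partial + [rest[i]], s + rest[i]))
--     return " OU ".join(parts)
-- ===== Notes on version B (the rewrite author's own statement) =====
-- stated objective: alternative
-- what changed: The recursive generator subset_sum is replaced by an iterative depth-first search over an explicit LIFO stack of (remaining-suffix, partial, partial-sum) frames (children pushed in reverse index order to keep A's preorder), and the string-concatenation loops are replaced by str.join-based formatting that reproduces A's trailing-separator slicing exactly.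
import Mathlib
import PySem

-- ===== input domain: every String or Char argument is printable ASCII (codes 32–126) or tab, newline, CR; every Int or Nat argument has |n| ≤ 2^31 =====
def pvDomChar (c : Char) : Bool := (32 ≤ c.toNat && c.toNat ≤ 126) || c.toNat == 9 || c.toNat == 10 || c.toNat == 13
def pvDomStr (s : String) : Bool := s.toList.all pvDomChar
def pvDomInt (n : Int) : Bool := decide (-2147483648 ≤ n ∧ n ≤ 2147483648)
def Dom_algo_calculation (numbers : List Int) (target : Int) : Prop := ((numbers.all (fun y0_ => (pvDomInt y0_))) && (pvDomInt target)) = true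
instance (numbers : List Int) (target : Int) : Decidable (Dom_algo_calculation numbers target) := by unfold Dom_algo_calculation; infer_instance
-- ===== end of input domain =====

-- B replaces the recursive generator with an explicit LIFO-stack depth-first search and
-- builds the result with str.join; same return value, similar cost (objective: alternative).

-- ===== PORT A =====
-- subset_sum: the generator's yields, in order.  The 'for i, n in enumerate(numbers):
-- remaining = numbers[i+1:]' loop is ported as pvSubsetSumALoop walking the list:
-- at element n the remaining suffix numbers[i+1:] is exactly the tail after n.
mutual
def pvSubsetSumA (numbers : List Int) (target : Int) (partialL : List Int) (psum : Int) :
    List (List Int) :=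
  let ys := if psum = target then [partialL] else []   -- if partial_sum == target: yield partial
  if psum ≥ target then ys                              -- if partial_sum >= target: return
  else ys ++ pvSubsetSumALoop numbers target partialL psum
termination_by (numbers.length, 1)

def pvSubsetSumALoop (numbers : List Int) (target : Int) (partialL : List Int) (psum : Int) :
    List (List Int) :=
  match numbers with
  | [] => []
  | n :: rs => pvSubsetSumA rs target (partialL ++ [n]) (psum + n) ++
               pvSubsetSumALoop rs target partialL psum
termination_by (numbers.length, 0)
end

def algo_calculation (numbers : List Int) (target : Int) : String :=
  let response :=
    (pvSubsetSumA numbers target [] 0).foldl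
      (fun response subset =>
        response ++
          (PySem.Str.slice
            (subset.foldl (fun result i => result ++ PySem.Int.toStr i ++ "+") "\"")
            none (some (-1)) ++ "\"") ++                                -- result[:-1] + '"'
          " OU ")
      ""
  PySem.Str.slice response none (some (-4))                             -- response[:-4]

-- ===== PORT B =====
-- termination measure for the stack loop: each frame weighs 2^(length of its suffix)
def pvStackMeasure (stk : List (List Int × List Int × Int)) : Nat :=
  (stk.map (fun f => 2 ^ f.1.length)).sum

-- cited by pvSubsetSumB's decreasing_by
theorem pvChildrenWeight (n : Nat) :
    ((List.range n).map (fun i => 2 ^ (n - (i + 1)))).sum = 2 ^ n - 1 := by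
  have h0 : ((List.range n).map (fun i => 2 ^ (n - (i + 1)))).sum
      = ∑ i ∈ Finset.range n, 2 ^ (n - (i + 1)) := Nat.add_zero _
  have h1 : ∑ i ∈ Finset.range n, 2 ^ (n - (i + 1)) = ∑ i ∈ Finset.range n, 2 ^ (n - 1 - i) :=
    Finset.sum_congr rfl (fun i _ => by congr 1; omega)
  rw [h0, h1, Finset.sum_range_reflect (fun i => 2 ^ i) n]
  clear h0 h1
  induction n with
  | zero => simp
  | succ n ih => rw [Finset.sum_range_succ, ih]; have := Nat.two_pow_pos n; omega

-- cited by pvSubsetSumB's decreasing_by: popping a frame shrinks the measure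
theorem pvMeasure_tail_lt (f : List Int × List Int × Int)
    (stk : List (List Int × List Int × Int)) :
    pvStackMeasure stk < pvStackMeasure (f :: stk) := by
  simp only [pvStackMeasure, List.map_cons, List.sum_cons]
  have := Nat.two_pow_pos f.1.length
  omega

-- cited by pvSubsetSumB's decreasing_by: replacing a frame by its children shrinks the measure
theorem pvMeasure_children_lt (rest partialL : List Int) (s : Int)
    (stk : List (List Int × List Int × Int)) :
    pvStackMeasure
        ((List.range rest.length).map
          (fun i => (rest.drop (i + 1), partialL ++ [rest.getD i 0], s + rest.getD i 0)) ++ stk)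
      < pvStackMeasure ((rest, partialL, s) :: stk) := by
  simp only [pvStackMeasure, List.map_append, List.sum_append, List.map_map,
    List.map_cons, List.sum_cons]
  have h : ((List.range rest.length).map
      ((fun f : List Int × List Int × Int => 2 ^ f.1.length) ∘
        (fun i => (rest.drop (i + 1), partialL ++ [rest.getD i 0], s + rest.getD i 0)))).sum
      = 2 ^ rest.length - 1 := by
    rw [show ((fun f : List Int × List Int × Int => 2 ^ f.1.length) ∘
        (fun i => (rest.drop (i + 1), partialL ++ [rest.getD i 0], s + rest.getD i 0)))
        = fun i => 2 ^ (rest.length - (i + 1)) from by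
      funext i; simp [List.length_drop]]
    exact pvChildrenWeight rest.length
  rw [h]
  have := Nat.two_pow_pos rest.length
  omega

-- while stack: pop (rest, partial, s); collect partial when s == target; prune when
-- s >= target; else push a child frame for each i in reversed(range(len(rest))).
-- The Lean stack has its TOP at the HEAD, so pushing indices len-1, …, 0 leaves the
-- children on the stack in increasing index order: (List.range rest.length).map child ++ stk.
def pvSubsetSumB (stk : List (List Int × List Int × Int)) (target : Int) : List (List Int) :=
  match stk with
  | [] => []
  | (rest, partialL, s) :: stk =>
    let found := if s = target then [partialL] else []
    if s ≥ target then found ++ pvSubsetSumB stk target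
    else
      found ++ pvSubsetSumB
        ((List.range rest.length).map
          (fun i => (rest.drop (i + 1), partialL ++ [rest.getD i 0], s + rest.getD i 0)) ++ stk)
        target
termination_by pvStackMeasure stk
decreasing_by
  · exact pvMeasure_tail_lt _ _
  · exact pvMeasure_children_lt _ _ _ _

-- '"' + "".join(str(n) + "+" for n in subset), then [:-1], then '"'
def pvFmtB (subset : List Int) : String :=
  PySem.Str.slice ("\"" ++ PySem.Str.join "" (subset.map (fun n => PySem.Int.toStr n ++ "+")))
    none (some (-1)) ++ "\""

def algo_calculation_alt (numbers : List Int) (target : Int) : String :=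
  PySem.Str.join " OU " ((pvSubsetSumB [(numbers, [], 0)] target).map pvFmtB)

-- ===== PRECONDITION & SPEC =====
def Spec_algo_calculation (numbers : List Int) (target : Int) (out : String) : Prop := out = algo_calculation_alt numbers target
instance (numbers : List Int) (target : Int) (out : String) : Decidable (Spec_algo_calculation numbers target out) := by unfold Spec_algo_calculation; infer_instance

-- ===== CLAIM (what is proved, stated in full; the proofs are below) =====
def Claim_equal_algo_calculation : Prop := ∀ (numbers : List Int) (target : Int), Dom_algo_calculation numbers target → Spec_algo_calculation numbers target (algo_calculation numbers target)

-- ===== LEMMAS AND PROOFS =====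

-- the children frames of a popped frame expand exactly to the generator's for-loop yields
theorem pvChildren_flatMap (target : Int) :
    ∀ (rest partialL : List Int) (s : Int),
    ((List.range rest.length).map
        (fun i => (rest.drop (i + 1), partialL ++ [rest.getD i 0], s + rest.getD i 0))).flatMap
      (fun f => pvSubsetSumA f.1 target f.2.1 f.2.2)
      = pvSubsetSumALoop rest target partialL s := by
  intro rest
  induction rest with
  | nil => intro partialL s; simp [pvSubsetSumALoop]
  | cons n rs ih =>
    intro partialL s
    rw [show (n :: rs).length = rs.length + 1 from rfl, List.range_succ_eq_map]
    simp only [List.map_cons, List.map_map, List.flatMap_cons]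
    have h : (List.map
        ((fun i => ((n :: rs).drop (i + 1), partialL ++ [(n :: rs).getD i 0],
            s + (n :: rs).getD i 0)) ∘ Nat.succ) (List.range rs.length)).flatMap
          (fun f => pvSubsetSumA f.1 target f.2.1 f.2.2)
        = pvSubsetSumALoop rs target partialL s := by
      rw [show ((fun i => ((n :: rs).drop (i + 1), partialL ++ [(n :: rs).getD i 0],
            s + (n :: rs).getD i 0)) ∘ Nat.succ)
          = fun i => (rs.drop (i + 1), partialL ++ [rs.getD i 0], s + rs.getD i 0) from by
        funext i; simp [Function.comp, List.getD]]
      exact ih partialL s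
    rw [h]
    simp [pvSubsetSumALoop, List.getD]

-- the stack loop produces, in order, the generator runs of its frames
theorem pvSubsetSumB_eq (stk : List (List Int × List Int × Int)) (target : Int) :
    pvSubsetSumB stk target = stk.flatMap (fun f => pvSubsetSumA f.1 target f.2.1 f.2.2) := by
  match stk with
  | [] => simp [pvSubsetSumB]
  | (rest, partialL, s) :: stk =>
    rw [pvSubsetSumB]
    by_cases hge : s ≥ target
    · have hA : pvSubsetSumA rest target partialL s
          = if s = target then [partialL] else [] := by
        rw [pvSubsetSumA]; simp [hge]
      rw [pvSubsetSumB_eq stk target]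
      simp [hge, List.flatMap_cons, hA]
    · have hne : ¬ s = target := by intro h; exact hge (le_of_eq h.symm)
      have hA : pvSubsetSumA rest target partialL s
          = pvSubsetSumALoop rest target partialL s := by
        rw [pvSubsetSumA]; simp [hge, hne]
      simp only [hge, hne, if_false]
      rw [pvSubsetSumB_eq ((List.range rest.length).map
          (fun i => (rest.drop (i + 1), partialL ++ [rest.getD i 0], s + rest.getD i 0)) ++ stk)
          target]
      rw [List.flatMap_append, pvChildren_flatMap]
      simp [List.flatMap_cons, hA]
  termination_by pvStackMeasure stk
  decreasing_by
  · exact pvMeasure_tail_lt _ _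
  · exact pvMeasure_children_lt _ _ _ _

-- "".join over List Char is flatten
theorem pvJoinNilSep : ∀ (parts : List (List Char)), PySem.Chars.join [] parts = parts.flatten := by
  intro parts
  match parts with
  | [] => simp [PySem.Chars.join_nil]
  | [p] => simp [PySem.Chars.join_singleton]
  | p :: q :: rest =>
    rw [PySem.Chars.join_cons_cons, pvJoinNilSep (q :: rest)]
    simp

-- A's '+'-appending string loop, at the character level
theorem pvInnerFoldChars (l : List Int) :
    ∀ (init : String),
    (l.foldl (fun result i => result ++ PySem.Int.toStr i ++ "+") init).toList
      = init.toList ++ (l.map (fun n => (PySem.Int.toStr n ++ "+").toList)).flatten := by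
  induction l with
  | nil => intro init; simp
  | cons n rs ih =>
    intro init
    rw [List.foldl_cons, ih]
    simp [String.toList_append]

-- the two per-subset formattings agree
theorem pvFmt_eq (subset : List Int) :
    PySem.Str.slice (subset.foldl (fun result i => result ++ PySem.Int.toStr i ++ "+") "\"")
        none (some (-1)) ++ "\""
      = pvFmtB subset := by
  apply String.toList_inj.mp
  have h0 : ("" : String).toList = [] := rfl
  simp only [pvFmtB, String.toList_append, PySem.Str.toList_slice,
    PySem.Chars.slice_eq_listSlice, PySem.List.slice_to_neg_one, PySem.Str.toList_join,
    List.map_map, h0]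
  rw [pvInnerFoldChars, pvJoinNilSep]
  have hplus : ("+" : String).toList = ['+'] := rfl
  simp [Function.comp_def, String.toList_append, PySem.Int.toList_toStr, hplus]

-- maps of (· ++ sep) flatten to a join with one trailing sep
theorem pvFlattenTrail (sep : List Char) :
    ∀ (parts : List (List Char)), parts ≠ [] →
    (parts.map (fun p => p ++ sep)).flatten = PySem.Chars.join sep parts ++ sep := by
  intro parts
  match parts with
  | [] => intro h; exact absurd rfl h
  | [p] => intro _; simp [PySem.Chars.join_singleton]
  | p :: q :: rest =>
    intro _
    rw [List.map_cons, List.flatten_cons, pvFlattenTrail sep (q :: rest) (by simp),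
      PySem.Chars.join_cons_cons]
    simp

-- A's ' OU '-appending outer loop, at the character level
theorem pvOuterFoldChars (parts : List String) :
    ∀ (init : String),
    (parts.foldl (fun resp p => resp ++ p ++ " OU ") init).toList
      = init.toList ++ (parts.map (fun p => p.toList ++ (" OU " : String).toList)).flatten := by
  induction parts with
  | nil => intro init; simp
  | cons p rest ih =>
    intro init
    rw [List.foldl_cons, ih]
    simp [String.toList_append]

-- trailing-separator accumulation + [:-4] is exactly " OU ".join
theorem pvJoinSlice (parts : List String) :
    PySem.Str.slice (parts.foldl (fun resp p => resp ++ p ++ " OU ") "") none (some (-4))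
      = PySem.Str.join " OU " parts := by
  apply String.toList_inj.mp
  have h0 : ("" : String).toList = [] := rfl
  simp only [PySem.Str.toList_slice, PySem.Chars.slice_eq_listSlice, PySem.Str.toList_join]
  rw [PySem.List.slice_to_neg_ofNat _ 4 (by omega), pvOuterFoldChars, h0, List.nil_append]
  match parts with
  | [] => simp [PySem.Chars.join_nil]
  | p :: rest =>
    rw [show (List.map (fun q : String => q.toList ++ (" OU " : String).toList) (p :: rest))
        = ((p :: rest).map String.toList).map (fun l => l ++ (" OU " : String).toList) from by
      simp]
    rw [pvFlattenTrail _ _ (by simp)]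
    rw [List.length_append]
    have hlen : ((" OU " : String).toList).length = 4 := by decide
    rw [hlen, Nat.add_sub_cancel, List.take_left]

-- ===== VERDICT (by name: the statement is the Claim_ definition above) =====
theorem algo_calculation_spec : Claim_equal_algo_calculation := by
  intro numbers target _
  unfold Spec_algo_calculation algo_calculation algo_calculation_alt
  have hsub : pvSubsetSumB [(numbers, [], 0)] target = pvSubsetSumA numbers target [] 0 := by
    rw [pvSubsetSumB_eq]; simp
  rw [hsub]
  have hfold : (pvSubsetSumA numbers target [] 0).foldl
      (fun response subset =>
        response ++ (PySem.Str.slice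
          (subset.foldl (fun result i => result ++ PySem.Int.toStr i ++ "+") "\"")
          none (some (-1)) ++ "\"") ++ " OU ") ""
      = ((pvSubsetSumA numbers target [] 0).map pvFmtB).foldl
          (fun resp p => resp ++ p ++ " OU ") "" := by
    rw [List.foldl_map]
    apply PySem.List.foldl_congr_mem
    intro acc subset _
    rw [pvFmt_eq]
  rw [hfold, pvJoinSlice]
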